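-- pv_equiv track=rewrite | github.com/MauriCapita/TrilliumVersione2 | trillium/rag/tile_ocr.py | compute_tile_grid
-- ===== SOURCE A (Python) =====
-- _GRID_RULES = [
--     # (max_long_side_px, rows, cols)
--     (5000,  2, 3),   # fino a A4:  6 tile
--     (7500,  3, 3),   # A3:         9 tile
--     (10500, 3, 4),   # A2/A1:     12 tile
--     (99999, 4, 4),   # A0+:       16 tile
-- ]
--
-- def compute_tile_grid(width: int, height: int) -> tuple[int, int]:
--     """
--     Restituisce (rows, cols) della griglia di tile in base alle dimensioni
--     dell'immagine. L'orientamento (landscape/portrait) viene normalizzato.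
--     """
--     long_side = max(width, height)
--     for max_px, rows, cols in _GRID_RULES:
--         if long_side <= max_px:
--             # Se portrait, scambia righe/colonne in modo che le colonne
--             # siano sempre sul lato lungo.
--             if height > width:
--                 return cols, rows
--             return rows, cols
--     return 4, 4
-- ===== SOURCE B (Python) =====
-- _THRESHOLDS = [5000, 7500, 10500]
-- _GRIDS = [(2, 3), (3, 3), (3, 4), (4, 4)]
--
-- def compute_tile_grid(width: int, height: int) -> tuple[int, int]:
--     long_side = max(width, height)
--     # binary search: first index with _THRESHOLDS[i] >= long_side (bisect_left)
--     lo, hi = 0, len(_THRESHOLDS)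
--     while lo < hi:
--         mid = (lo + hi) // 2
--         if _THRESHOLDS[mid] < long_side:
--             lo = mid + 1
--         else:
--             hi = mid
--     rows, cols = _GRIDS[lo]
--     return (cols, rows) if height > width else (rows, cols)
-- ===== Notes on version B (the rewrite author's own statement) =====
-- stated objective: alternative
-- what changed: Replaces the linear scan over (threshold, rows, cols) rules with a hand-rolled bisect_left binary search over a sorted threshold list indexing a parallel grid table, with the portrait swap applied once at the end.
import Mathlib
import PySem

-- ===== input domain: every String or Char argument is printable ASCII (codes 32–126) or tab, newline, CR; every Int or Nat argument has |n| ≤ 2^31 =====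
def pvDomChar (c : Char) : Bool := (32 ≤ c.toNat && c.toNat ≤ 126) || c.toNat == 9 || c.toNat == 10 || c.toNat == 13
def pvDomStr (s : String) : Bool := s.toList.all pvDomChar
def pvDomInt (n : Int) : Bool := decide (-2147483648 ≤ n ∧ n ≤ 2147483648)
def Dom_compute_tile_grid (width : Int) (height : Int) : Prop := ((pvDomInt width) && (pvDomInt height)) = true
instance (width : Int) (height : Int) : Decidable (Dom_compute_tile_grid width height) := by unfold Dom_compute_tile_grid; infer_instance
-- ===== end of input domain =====

-- B replaces A's linear scan over the rule list with a bisect_left binary search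
-- over a sorted threshold list indexing a parallel grid table (alternative structure).

-- ===== PORT A =====
def pvGridRules : List (Int × Int × Int) :=
  [(5000, 2, 3), (7500, 3, 3), (10500, 3, 4), (99999, 4, 4)]

-- the 'for max_px, rows, cols in _GRID_RULES' loop with early return
def pvALoop (long_side width height : Int) : List (Int × Int × Int) → Int × Int
  | [] => (4, 4)
  | (max_px, rows, cols) :: rest =>
      if long_side ≤ max_px then
        if height > width then (cols, rows) else (rows, cols)
      else pvALoop long_side width height rest

def compute_tile_grid (width : Int) (height : Int) : Int × Int :=
  pvALoop (max width height) width height pvGridRules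

-- ===== PORT B =====
def pvThresholds : List Int := [5000, 7500, 10500]
def pvGrids : List (Int × Int) := [(2, 3), (3, 3), (3, 4), (4, 4)]

-- the 'while lo < hi' bisect_left loop of Source B, step for step
def pvBisect (x : Int) (lo hi : Nat) : Nat :=
  if lo < hi then
    let mid := (lo + hi) / 2
    if pvThresholds.getD mid 0 < x then pvBisect x (mid + 1) hi
    else pvBisect x lo mid
  else lo
termination_by hi - lo
decreasing_by all_goals omega

def compute_tile_grid_alt (width : Int) (height : Int) : Int × Int :=
  let long_side := max width height
  let idx := pvBisect long_side 0 pvThresholds.length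
  let rc := pvGrids.getD idx (0, 0)
  if height > width then (rc.2, rc.1) else (rc.1, rc.2)

-- ===== PRECONDITION & SPEC =====
def Spec_compute_tile_grid (width : Int) (height : Int) (out : Int × Int) : Prop := out = compute_tile_grid_alt width height
instance (width : Int) (height : Int) (out : Int × Int) : Decidable (Spec_compute_tile_grid width height out) := by unfold Spec_compute_tile_grid; infer_instance

-- ===== CLAIM (what is proved, stated in full; the proofs are below) =====
def Claim_equal_compute_tile_grid : Prop := ∀ (width : Int) (height : Int), Dom_compute_tile_grid width height → Spec_compute_tile_grid width height (compute_tile_grid width height)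

-- ===== LEMMAS AND PROOFS =====
lemma pvBisect_eval (x : Int) :
    pvBisect x 0 3 =
      if x ≤ 5000 then 0 else if x ≤ 7500 then 1 else if x ≤ 10500 then 2 else 3 := by
  unfold pvBisect
  simp only [pvThresholds, List.getD]
  norm_num
  split_ifs <;> (unfold pvBisect <;> simp only [pvThresholds, List.getD] <;> norm_num) <;>
    (try unfold pvBisect) <;> simp_all <;> omega

-- ===== VERDICT (by name: the statement is the Claim_ definition above) =====
theorem compute_tile_grid_spec : Claim_equal_compute_tile_grid := by
  intro width height _
  unfold Spec_compute_tile_grid compute_tile_grid compute_tile_grid_alt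
  have hlen : pvThresholds.length = 3 := by simp [pvThresholds]
  dsimp only
  rw [hlen, pvBisect_eval]
  set ls := max width height with hls
  by_cases h1 : ls ≤ 5000
  · simp [pvGridRules, pvALoop, pvGrids, h1]
  · by_cases h2 : ls ≤ 7500
    · simp [pvGridRules, pvALoop, pvGrids, h1, h2]
    · by_cases h3 : ls ≤ 10500
      · simp [pvGridRules, pvALoop, pvGrids, h1, h2, h3]
      · by_cases h4 : ls ≤ 99999
        · simp [pvGridRules, pvALoop, pvGrids, h1, h2, h3, h4]
        · simp [pvGridRules, pvALoop, pvGrids, h1, h2, h3, h4]
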